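-- pv_equiv track=rewrite | github.com/whyshhh/AI-Career-navigator- | navigator.py | suggest_learning_resources
-- ===== SOURCE A (Python) =====
-- def suggest_learning_resources(missing_keywords):
--     """
--     Map missing keywords to suggested learning resources.
--     """
--     resources = {}
--     for kw in missing_keywords[:10]:  # limit to top 10 gaps
--         if "python" in kw:
--             resources[kw] = "NPTEL Python Course, LeetCode Python practice"
--         elif "java" in kw:
--             resources[kw] = "Coursera Java Programming, HackerRank Java challenges"
--         elif "ml" in kw or "machine" in kw:
--             resources[kw] = "Andrew Ng’s ML course (Coursera), Kaggle tutorials"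
--         elif "data" in kw or "sql" in kw:
--             resources[kw] = "Mode Analytics SQL tutorials, DataCamp Data Science tracks"
--         elif "cloud" in kw or "aws" in kw or "azure" in kw:
--             resources[kw] = "AWS Academy, Microsoft Learn Azure Fundamentals"
--         elif "react" in kw or "frontend" in kw:
--             resources[kw] = "FreeCodeCamp React guide, Frontend Mentor projects"
--         else:
--             resources[kw] = f"Search for {kw} tutorials on Coursera, Udemy, or NPTEL"
--     return resources
-- ===== SOURCE B (Python) =====
-- RULES = [
--     (("python",), "NPTEL Python Course, LeetCode Python practice"),
--     (("java",), "Coursera Java Programming, HackerRank Java challenges"),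
--     (("ml", "machine"), "Andrew Ng’s ML course (Coursera), Kaggle tutorials"),
--     (("data", "sql"), "Mode Analytics SQL tutorials, DataCamp Data Science tracks"),
--     (("cloud", "aws", "azure"), "AWS Academy, Microsoft Learn Azure Fundamentals"),
--     (("react", "frontend"), "FreeCodeCamp React guide, Frontend Mentor projects"),
-- ]
--
--
-- def suggest_learning_resources(missing_keywords):
--     top = missing_keywords[:10]
--     # Stage 1: every keyword starts with the generic fallback suggestion.
--     resources = {kw: f"Search for {kw} tutorials on Coursera, Udemy, or NPTEL" for kw in top}
--     # Stage 2: sweep the rules from lowest to highest priority, overwriting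
--     # matches, so the highest-priority (first) rule wins at the end.
--     for subs, res in reversed(RULES):
--         for kw in top:
--             if any(s in kw for s in subs):
--                 resources[kw] = res
--     return resources
-- ===== Notes on version B (the rewrite author's own statement) =====
-- stated objective: alternative
-- what changed: B inverts the loop nesting: instead of deciding each keyword's resource by an if/elif chain, it first assigns every keyword the generic fallback and then sweeps the rule table in reverse priority order, overwriting matching entries so the highest-priority rule wins last.
import Mathlib
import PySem

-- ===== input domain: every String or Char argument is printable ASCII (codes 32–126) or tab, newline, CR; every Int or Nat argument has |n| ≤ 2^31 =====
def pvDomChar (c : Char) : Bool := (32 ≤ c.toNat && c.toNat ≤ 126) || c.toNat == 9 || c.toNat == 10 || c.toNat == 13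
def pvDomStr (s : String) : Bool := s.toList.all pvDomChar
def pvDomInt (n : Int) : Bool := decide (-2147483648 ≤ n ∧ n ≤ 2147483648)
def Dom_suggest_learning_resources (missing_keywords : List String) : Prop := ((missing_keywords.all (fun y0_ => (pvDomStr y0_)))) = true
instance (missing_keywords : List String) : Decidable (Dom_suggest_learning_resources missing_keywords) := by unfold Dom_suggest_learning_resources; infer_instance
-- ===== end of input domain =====

-- B inverts the loop nesting: a fallback-filled dict is overwritten by rule sweeps in reverse priority order (objective: alternative).


-- ===== PORT A =====
def suggest_learning_resources (missing_keywords : List String) : List (String × String) :=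
  ((PySem.List.slice missing_keywords none (some 10)).foldl
    (fun (resources : PySem.Dict String String) kw =>
      if PySem.Str.isIn "python" kw then
        resources.insert kw "NPTEL Python Course, LeetCode Python practice"
      else if PySem.Str.isIn "java" kw then
        resources.insert kw "Coursera Java Programming, HackerRank Java challenges"
      else if PySem.Str.isIn "ml" kw || PySem.Str.isIn "machine" kw then
        resources.insert kw "Andrew Ng’s ML course (Coursera), Kaggle tutorials"
      else if PySem.Str.isIn "data" kw || PySem.Str.isIn "sql" kw then
        resources.insert kw "Mode Analytics SQL tutorials, DataCamp Data Science tracks"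
      else if PySem.Str.isIn "cloud" kw || PySem.Str.isIn "aws" kw || PySem.Str.isIn "azure" kw then
        resources.insert kw "AWS Academy, Microsoft Learn Azure Fundamentals"
      else if PySem.Str.isIn "react" kw || PySem.Str.isIn "frontend" kw then
        resources.insert kw "FreeCodeCamp React guide, Frontend Mentor projects"
      else
        resources.insert kw ("Search for " ++ kw ++ " tutorials on Coursera, Udemy, or NPTEL"))
    PySem.Dict.empty).items

-- ===== PORT B =====
def pvRules : List (List String × String) :=
  [ (["python"], "NPTEL Python Course, LeetCode Python practice"),
    (["java"], "Coursera Java Programming, HackerRank Java challenges"),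
    (["ml", "machine"], "Andrew Ng’s ML course (Coursera), Kaggle tutorials"),
    (["data", "sql"], "Mode Analytics SQL tutorials, DataCamp Data Science tracks"),
    (["cloud", "aws", "azure"], "AWS Academy, Microsoft Learn Azure Fundamentals"),
    (["react", "frontend"], "FreeCodeCamp React guide, Frontend Mentor projects") ]

def suggest_learning_resources_alt (missing_keywords : List String) : List (String × String) :=
  let top := PySem.List.slice missing_keywords none (some 10)
  -- Stage 1: every keyword starts with the generic fallback.
  let d0 := top.foldl
    (fun (d : PySem.Dict String String) kw =>
      d.insert kw ("Search for " ++ kw ++ " tutorials on Coursera, Udemy, or NPTEL"))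
    PySem.Dict.empty
  -- Stage 2: sweep the rules from lowest to highest priority, overwriting matches.
  (pvRules.reverse.foldl
    (fun (d : PySem.Dict String String) r =>
      top.foldl
        (fun (d : PySem.Dict String String) kw =>
          if r.1.any (fun s => PySem.Str.isIn s kw) then d.insert kw r.2 else d)
        d)
    d0).items

-- ===== PRECONDITION & SPEC =====
def Spec_suggest_learning_resources (missing_keywords : List String) (out : List (String × String)) : Prop := out = suggest_learning_resources_alt missing_keywords
instance (missing_keywords : List String) (out : List (String × String)) : Decidable (Spec_suggest_learning_resources missing_keywords out) := by unfold Spec_suggest_learning_resources; infer_instance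

-- ===== CLAIM (what is proved, stated in full; the proofs are below) =====
def Claim_equal_suggest_learning_resources : Prop := ∀ (missing_keywords : List String), Dom_suggest_learning_resources missing_keywords → Spec_suggest_learning_resources missing_keywords (suggest_learning_resources missing_keywords)

-- ===== LEMMAS AND PROOFS =====

-- the resource A's if/elif chain computes for kw (proof helper)
def pvARes (kw : String) : String :=
  if PySem.Str.isIn "python" kw then "NPTEL Python Course, LeetCode Python practice"
  else if PySem.Str.isIn "java" kw then "Coursera Java Programming, HackerRank Java challenges"
  else if PySem.Str.isIn "ml" kw || PySem.Str.isIn "machine" kw then "Andrew Ng’s ML course (Coursera), Kaggle tutorials"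
  else if PySem.Str.isIn "data" kw || PySem.Str.isIn "sql" kw then "Mode Analytics SQL tutorials, DataCamp Data Science tracks"
  else if PySem.Str.isIn "cloud" kw || PySem.Str.isIn "aws" kw || PySem.Str.isIn "azure" kw then "AWS Academy, Microsoft Learn Azure Fundamentals"
  else if PySem.Str.isIn "react" kw || PySem.Str.isIn "frontend" kw then "FreeCodeCamp React guide, Frontend Mentor projects"
  else "Search for " ++ kw ++ " tutorials on Coursera, Udemy, or NPTEL"

-- A's loop step inserts kw with pvARes kw
theorem pvStep_eq :
    (fun (resources : PySem.Dict String String) kw =>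
      if PySem.Str.isIn "python" kw then
        resources.insert kw "NPTEL Python Course, LeetCode Python practice"
      else if PySem.Str.isIn "java" kw then
        resources.insert kw "Coursera Java Programming, HackerRank Java challenges"
      else if PySem.Str.isIn "ml" kw || PySem.Str.isIn "machine" kw then
        resources.insert kw "Andrew Ng’s ML course (Coursera), Kaggle tutorials"
      else if PySem.Str.isIn "data" kw || PySem.Str.isIn "sql" kw then
        resources.insert kw "Mode Analytics SQL tutorials, DataCamp Data Science tracks"
      else if PySem.Str.isIn "cloud" kw || PySem.Str.isIn "aws" kw || PySem.Str.isIn "azure" kw then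
        resources.insert kw "AWS Academy, Microsoft Learn Azure Fundamentals"
      else if PySem.Str.isIn "react" kw || PySem.Str.isIn "frontend" kw then
        resources.insert kw "FreeCodeCamp React guide, Frontend Mentor projects"
      else
        resources.insert kw ("Search for " ++ kw ++ " tutorials on Coursera, Udemy, or NPTEL")) =
    (fun (d : PySem.Dict String String) kw => d.insert kw (pvARes kw)) := by
  funext d kw
  simp only [pvARes]
  split_ifs <;> rfl

-- lookup in a fold that inserts g kw for each kw ∈ L
theorem pvMk_getD (g : String → String) (dflt : String) :
    ∀ (L : List String) (d : PySem.Dict String String) (k : String),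
      (L.foldl (fun d kw => d.insert kw (g kw)) d).getD k dflt =
        if k ∈ L then g k else d.getD k dflt := by
  intro L
  induction L with
  | nil => intro d k; simp
  | cons a L ih =>
      intro d k
      simp only [List.foldl_cons, ih, List.mem_cons, PySem.Dict.getD_insert]
      by_cases hk : k ∈ L
      · simp [hk]
      · by_cases ha : k = a <;> simp [hk, ha]

-- lookup after one conditional overwrite pass
theorem pvPass_getD (p : String → Bool) (v dflt : String) :
    ∀ (L : List String) (d : PySem.Dict String String) (k : String),
      (L.foldl (fun d kw => if p kw then d.insert kw v else d) d).getD k dflt =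
        if k ∈ L ∧ p k then v else d.getD k dflt := by
  intro L
  induction L with
  | nil => intro d k; simp
  | cons a L ih =>
      intro d k
      simp only [List.foldl_cons, ih, List.mem_cons]
      by_cases hk : k ∈ L ∧ p k = true
      · simp [hk.1, hk.2]
      · by_cases ha : k = a
        · subst ha
          by_cases hp : p k = true <;> simp [hp, PySem.Dict.getD_insert]
        · by_cases hp : p a = true <;> simp [hp, ha, hk, PySem.Dict.getD_insert]

-- one conditional overwrite pass over keys already present leaves the key list unchanged
theorem pvPass_keys (p : String → Bool) (v : String) :
    ∀ (L : List String) (d : PySem.Dict String String),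
      (∀ kw ∈ L, kw ∈ d.keys) →
      (L.foldl (fun d kw => if p kw then d.insert kw v else d) d).keys = d.keys := by
  intro L
  induction L with
  | nil => intro d _; rfl
  | cons a L ih =>
      intro d h
      simp only [List.foldl_cons]
      by_cases hp : p a = true
      · have hka : (d.insert a v).keys = d.keys :=
          PySem.Dict.keys_insert_of_contains _ _
            (by simpa [PySem.Dict.contains_iff_mem_keys] using h a (by simp))
        simp only [hp, if_pos]
        rw [ih _ (by intro kw hkw; rw [hka]; exact h kw (List.mem_cons_of_mem _ hkw)), hka]
      · simp only [hp, Bool.false_eq_true, if_false]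
        exact ih _ (fun kw hkw => h kw (List.mem_cons_of_mem _ hkw))

-- lookup after sweeping a whole rule list over a dict whose lookups are given by h on L
theorem pvSweep_getD (L : List String) (dflt : String) :
    ∀ (rules : List (List String × String)) (d : PySem.Dict String String) (h : String → String),
      (∀ j, d.getD j dflt = if j ∈ L then h j else dflt) →
      ∀ k,
      (rules.foldl
        (fun (d : PySem.Dict String String) r =>
          L.foldl (fun d kw => if r.1.any (fun s => PySem.Str.isIn s kw) then d.insert kw r.2 else d) d)
        d).getD k dflt =
      if k ∈ L then
        rules.foldl (fun acc r => if r.1.any (fun s => PySem.Str.isIn s k) then r.2 else acc) (h k)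
      else dflt := by
  intro rules
  induction rules with
  | nil => intro d h hd k; simpa using hd k
  | cons r rules ih =>
      intro d h hd k
      simp only [List.foldl_cons]
      rw [ih _ (fun j => if r.1.any (fun s => PySem.Str.isIn s j) then r.2 else h j)
            (by
              intro j
              rw [pvPass_getD, hd j]
              by_cases hj : j ∈ L <;> simp [hj])]

-- sweeping rules over keys already present leaves the key list unchanged
theorem pvSweep_keys (L : List String) :
    ∀ (rules : List (List String × String)) (d : PySem.Dict String String),
      (∀ kw ∈ L, kw ∈ d.keys) →
      (rules.foldl
        (fun (d : PySem.Dict String String) r =>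
          L.foldl (fun d kw => if r.1.any (fun s => PySem.Str.isIn s kw) then d.insert kw r.2 else d) d)
        d).keys = d.keys := by
  intro rules
  induction rules with
  | nil => intro d _; rfl
  | cons r rules ih =>
      intro d h
      simp only [List.foldl_cons]
      have hp := pvPass_keys (fun kw => r.1.any (fun s => PySem.Str.isIn s kw)) r.2 L d h
      rw [ih _ (by intro kw hkw; rw [hp]; exact h kw hkw)]
      exact hp

-- keys of the insert-g fold from empty
theorem pvMk_keys (g : String → String) (L : List String) :
    (L.foldl (fun (d : PySem.Dict String String) kw => d.insert kw (g kw)) PySem.Dict.empty).keys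
      = PySem.Set.ofList L := by
  rw [PySem.Dict.keys_foldl_insert, PySem.Dict.keys_empty, PySem.Set.update_nil_left]

-- the reverse sweep of the concrete rule table computes A's if/elif chain
theorem pvChain_eq (k : String) (init : String) :
    pvRules.reverse.foldl
      (fun acc r => if r.1.any (fun s => PySem.Str.isIn s k) then r.2 else acc)
      init =
    (if PySem.Str.isIn "python" k then "NPTEL Python Course, LeetCode Python practice"
     else if PySem.Str.isIn "java" k then "Coursera Java Programming, HackerRank Java challenges"
     else if PySem.Str.isIn "ml" k || PySem.Str.isIn "machine" k then "Andrew Ng’s ML course (Coursera), Kaggle tutorials"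
     else if PySem.Str.isIn "data" k || PySem.Str.isIn "sql" k then "Mode Analytics SQL tutorials, DataCamp Data Science tracks"
     else if PySem.Str.isIn "cloud" k || PySem.Str.isIn "aws" k || PySem.Str.isIn "azure" k then "AWS Academy, Microsoft Learn Azure Fundamentals"
     else if PySem.Str.isIn "react" k || PySem.Str.isIn "frontend" k then "FreeCodeCamp React guide, Frontend Mentor projects"
     else init) := by
  simp only [pvRules, List.reverse_cons, List.reverse_nil, List.nil_append, List.cons_append,
    List.foldl_cons, List.foldl_nil, List.any_cons, List.any_nil, Bool.or_false, Bool.or_assoc]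

-- ===== VERDICT (by name: the statement is the Claim_ definition above) =====
theorem suggest_learning_resources_spec : Claim_equal_suggest_learning_resources := by
  intro mk _
  unfold Spec_suggest_learning_resources suggest_learning_resources suggest_learning_resources_alt
  rw [pvStep_eq]
  set top := PySem.List.slice mk none (some 10) with htop
  set g0 : String → String :=
    fun kw => "Search for " ++ kw ++ " tutorials on Coursera, Udemy, or NPTEL" with hg0
  set dA := top.foldl (fun (d : PySem.Dict String String) kw => d.insert kw (pvARes kw)) PySem.Dict.empty with hdA
  set d0 := top.foldl (fun (d : PySem.Dict String String) kw => d.insert kw (g0 kw)) PySem.Dict.empty with hd0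
  set dB := pvRules.reverse.foldl
      (fun (d : PySem.Dict String String) r =>
        top.foldl (fun d kw => if r.1.any (fun s => PySem.Str.isIn s kw) then d.insert kw r.2 else d) d)
      d0 with hdB
  -- keys
  have hkeys0 : d0.keys = PySem.Set.ofList top := pvMk_keys _ top
  have hmem0 : ∀ kw ∈ top, kw ∈ d0.keys := by
    intro kw h; rw [hkeys0]; exact (PySem.Set.mem_ofList top kw).mpr h
  have hkeysB : dB.keys = d0.keys := pvSweep_keys top _ d0 hmem0
  have hkeysA : dA.keys = PySem.Set.ofList top := pvMk_keys _ top
  have hndA : dA.keys.Nodup := by rw [hkeysA]; exact PySem.Set.nodup_ofList top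
  have hndB : dB.keys.Nodup := by rw [hkeysB, hkeys0]; exact PySem.Set.nodup_ofList top
  -- items as maps over keys
  rw [PySem.Dict.items_eq_map_keys dA hndA "", PySem.Dict.items_eq_map_keys dB hndB "",
      hkeysA, hkeysB, hkeys0]
  apply List.map_congr_left
  intro k hkset
  have hk : k ∈ top := (PySem.Set.mem_ofList top k).mp hkset
  have hA : dA.getD k "" = pvARes k := by
    rw [hdA, pvMk_getD]; simp [hk]
  have hB : dB.getD k "" = pvARes k := by
    rw [hdB, pvSweep_getD top "" pvRules.reverse d0 g0
          (by intro j; rw [hd0, pvMk_getD]; simp) k,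
        if_pos hk, pvChain_eq k (g0 k)]
    simp only [pvARes]
    split_ifs <;> rfl
  rw [hA, hB]
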